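-- pv_equiv track=rewrite | github.com/LYMingML/video2text | fastapi_app.py | _is_final_output_file
-- ===== SOURCE A (Python) =====
-- def _is_final_output_file(filename: str, file_prefix: str) -> bool:
--     allowed = {
--         f"{file_prefix}.srt",
--         f"{file_prefix}.txt",
--     }
--     for lang in {"zh", "en", "ja", "ko", "es", "fr", "de", "ru"}:
--         allowed.add(f"{file_prefix}.{lang}.srt")
--         allowed.add(f"{file_prefix}.{lang}.txt")
--     return filename in allowed
-- ===== SOURCE B (Python) =====
-- LANGS = ("zh", "en", "ja", "ko", "es", "fr", "de", "ru")
--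
-- def _is_final_output_file(filename: str, file_prefix: str) -> bool:
--     pdot = file_prefix + "."
--     if not filename.startswith(pdot):
--         return False
--     rest = filename[len(pdot):]
--     if rest in ("srt", "txt"):
--         return True
--     lang, dot, ext = rest.partition(".")
--     return dot == "." and lang in LANGS and ext in ("srt", "txt")
-- ===== Notes on version B (the rewrite author's own statement) =====
-- stated objective: simpler
-- what changed: B validates the filename structurally (prefix+'.' test, then check the remainder is 'srt'/'txt' or partitions into a known language code and 'srt'/'txt') instead of enumerating all 18 allowed filenames into a set and testing membership.
import Mathlib
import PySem

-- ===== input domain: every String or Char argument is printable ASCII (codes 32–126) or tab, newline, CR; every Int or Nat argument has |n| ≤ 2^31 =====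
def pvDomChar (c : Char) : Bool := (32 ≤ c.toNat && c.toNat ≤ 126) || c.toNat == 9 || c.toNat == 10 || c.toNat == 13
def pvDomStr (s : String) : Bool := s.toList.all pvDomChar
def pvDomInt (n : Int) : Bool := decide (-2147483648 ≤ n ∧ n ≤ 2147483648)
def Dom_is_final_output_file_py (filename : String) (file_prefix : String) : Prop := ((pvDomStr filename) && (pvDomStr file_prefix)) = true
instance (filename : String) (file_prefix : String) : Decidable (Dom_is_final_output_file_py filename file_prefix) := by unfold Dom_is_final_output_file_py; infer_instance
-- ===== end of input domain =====

-- B validates the filename structurally (prefix test + partition of the suffix) instead of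
-- enumerating all 18 allowed filenames into a set; objective: simpler (and O(|prefix|) work
-- instead of building 18 strings of that length).
-- Strings are modelled by their character lists (Python string equality = char-list equality).

-- ===== PORT A =====
-- the literal {"zh", …} set A iterates over (iteration order does not affect membership)
def pyLangs : List (List Char) :=
  ["zh".toList, "en".toList, "ja".toList, "ko".toList, "es".toList, "fr".toList, "de".toList, "ru".toList]

def is_final_output_file_py (filename : String) (file_prefix : String) : Bool :=
  let pre := file_prefix.toList
  -- allowed = {f"{file_prefix}.srt", f"{file_prefix}.txt"}
  let allowed : PySem.Set (List Char) :=
    PySem.Set.ofList [pre ++ ".srt".toList, pre ++ ".txt".toList]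
  -- for lang in {...}: allowed.add(f"{file_prefix}.{lang}.srt"); allowed.add(f"{file_prefix}.{lang}.txt")
  let allowed := pyLangs.foldl
    (fun s lang =>
      PySem.Set.add (PySem.Set.add s (pre ++ ".".toList ++ lang ++ ".srt".toList))
        (pre ++ ".".toList ++ lang ++ ".txt".toList)) allowed
  PySem.Set.contains allowed filename.toList

-- ===== PORT B =====
-- LANGS tuple of Source B
def pyLangsB : List (List Char) :=
  ["zh".toList, "en".toList, "ja".toList, "ko".toList, "es".toList, "fr".toList, "de".toList, "ru".toList]

-- rest.partition('.') : (head, sep, tail) with sep = "" when '.' does not occur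
def pyPartitionDot : List Char → List Char × List Char × List Char
  | [] => ([], [], [])
  | c :: cs =>
    if c = '.' then ([], ['.'], cs)
    else
      match pyPartitionDot cs with
      | (a, b, r) => (c :: a, b, r)

def is_final_output_file_py_alt (filename : String) (file_prefix : String) : Bool :=
  let pdot := file_prefix.toList ++ ['.']
  if PySem.Chars.startswith filename.toList pdot then
    -- rest = filename[len(pdot):]  (start index = pdot.length ≥ 0, so the slice is a drop)
    let rest := filename.toList.drop pdot.length
    if rest == "srt".toList || rest == "txt".toList then true
    else
      let (lang, dot, ext) := pyPartitionDot rest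
      dot == ['.'] && pyLangsB.contains lang && (ext == "srt".toList || ext == "txt".toList)
  else false

-- ===== PRECONDITION & SPEC =====
def Spec_is_final_output_file_py (filename : String) (file_prefix : String) (out : Bool) : Prop := out = is_final_output_file_py_alt filename file_prefix
instance (filename : String) (file_prefix : String) (out : Bool) : Decidable (Spec_is_final_output_file_py filename file_prefix out) := by unfold Spec_is_final_output_file_py; infer_instance

-- ===== CLAIM (what is proved, stated in full; the proofs are below) =====
def Claim_equal_is_final_output_file_py : Prop := ∀ (filename : String) (file_prefix : String), Dom_is_final_output_file_py filename file_prefix → Spec_is_final_output_file_py filename file_prefix (is_final_output_file_py filename file_prefix)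

-- ===== LEMMAS AND PROOFS =====

-- the 16+2 allowed suffixes after "file_prefix."
def pvTails : List (List Char) :=
  ["srt".toList, "txt".toList,
   "zh.srt".toList, "zh.txt".toList, "en.srt".toList, "en.txt".toList,
   "ja.srt".toList, "ja.txt".toList, "ko.srt".toList, "ko.txt".toList,
   "es.srt".toList, "es.txt".toList, "fr.srt".toList, "fr.txt".toList,
   "de.srt".toList, "de.txt".toList, "ru.srt".toList, "ru.txt".toList]

lemma pv_drop_len_append (l r : List Char) : (l ++ r).drop l.length = r := by simp

lemma part_dot (r a b : List Char) (h : pyPartitionDot r = (a, ['.'], b)) :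
    r = a ++ '.' :: b := by
  induction r generalizing a b with
  | nil => simp [pyPartitionDot] at h
  | cons c cs ih =>
    by_cases hc : c = '.'
    · subst hc
      simp [pyPartitionDot] at h
      obtain ⟨rfl, rfl⟩ := h
      simp
    · rcases hph : pyPartitionDot cs with ⟨a', b', r'⟩
      simp only [pyPartitionDot, if_neg hc, hph, Prod.mk.injEq] at h
      obtain ⟨rfl, rfl, rfl⟩ := h
      simpa using congrArg (c :: ·) (ih _ _ hph)

lemma restOk_iff (r : List Char) :
    (if r == "srt".toList || r == "txt".toList then true
     else
       let (lang, dot, ext) := pyPartitionDot r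
       dot == ['.'] && pyLangsB.contains lang && (ext == "srt".toList || ext == "txt".toList))
      = true ↔ r ∈ pvTails := by
  constructor
  · intro h
    split at h
    · rename_i hst
      simp at hst
      rcases hst with rfl | rfl <;> simp [pvTails]
    · rcases hph : pyPartitionDot r with ⟨lang, dot, ext⟩
      rw [hph] at h
      simp only [Bool.and_eq_true, Bool.or_eq_true, beq_iff_eq] at h
      obtain ⟨⟨rfl, hl⟩, he⟩ := h
      have hr := part_dot r lang ext hph
      subst hr
      simp [pyLangsB] at hl
      rcases hl with rfl|rfl|rfl|rfl|rfl|rfl|rfl|rfl <;>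
        rcases he with rfl|rfl <;> simp [pvTails]
  · intro h
    simp [pvTails] at h
    rcases h with rfl|rfl|rfl|rfl|rfl|rfl|rfl|rfl|rfl|rfl|rfl|rfl|rfl|rfl|rfl|rfl|rfl|rfl <;> decide

lemma B_iff (filename file_prefix : String) :
    is_final_output_file_py_alt filename file_prefix = true ↔
      ∃ t ∈ pvTails, filename.toList = file_prefix.toList ++ '.' :: t := by
  unfold is_final_output_file_py_alt
  by_cases hs : PySem.Chars.startswith filename.toList (file_prefix.toList ++ ['.']) = true
  · obtain ⟨r, hr⟩ := (PySem.Chars.startswith_iff _ _).mp hs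
    simp only [hs, if_true]
    have hdrop : filename.toList.drop (file_prefix.toList ++ ['.']).length = r := by
      rw [← hr]; exact pv_drop_len_append _ _
    rw [hdrop]
    rw [restOk_iff r]
    constructor
    · intro h
      exact ⟨r, h, by rw [← hr]; simp⟩
    · rintro ⟨t, ht, hf⟩
      have : (file_prefix.toList ++ ['.']) ++ r = (file_prefix.toList ++ ['.']) ++ t := by
        rw [hr, hf]; simp
      rwa [List.append_cancel_left this]
  · simp only [Bool.not_eq_true] at hs
    simp only [hs, Bool.false_eq_true, if_false, false_iff, not_exists]
    rintro t ⟨_, hf⟩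
    have : PySem.Chars.startswith filename.toList (file_prefix.toList ++ ['.']) = true :=
      (PySem.Chars.startswith_iff filename.toList (file_prefix.toList ++ ['.'])).mpr
        ⟨t, by rw [hf]; simp⟩
    simp [this] at hs

lemma A_iff (filename file_prefix : String) :
    is_final_output_file_py filename file_prefix = true ↔
      ∃ t ∈ pvTails, filename.toList = file_prefix.toList ++ '.' :: t := by
  unfold is_final_output_file_py
  rw [show ∀ (s : PySem.Set (List Char)) x, (PySem.Set.contains s x = true) = (x ∈ s) from
    fun s x => by simp [PySem.Set.contains]]
  simp only [pyLangs, List.foldl, PySem.Set.mem_add, PySem.Set.mem_ofList, List.mem_cons,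
    List.not_mem_nil, or_false, or_assoc]
  constructor
  · intro h
    rcases h with (h | h | h | h | h | h | h | h | h | h | h | h | h | h | h | h | h | h)
    · exact ⟨"srt".toList, by simp [pvTails], by rw [h]; simp⟩
    · exact ⟨"txt".toList, by simp [pvTails], by rw [h]; simp⟩
    · exact ⟨"zh.srt".toList, by simp [pvTails], by rw [h]; simp⟩
    · exact ⟨"zh.txt".toList, by simp [pvTails], by rw [h]; simp⟩
    · exact ⟨"en.srt".toList, by simp [pvTails], by rw [h]; simp⟩
    · exact ⟨"en.txt".toList, by simp [pvTails], by rw [h]; simp⟩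
    · exact ⟨"ja.srt".toList, by simp [pvTails], by rw [h]; simp⟩
    · exact ⟨"ja.txt".toList, by simp [pvTails], by rw [h]; simp⟩
    · exact ⟨"ko.srt".toList, by simp [pvTails], by rw [h]; simp⟩
    · exact ⟨"ko.txt".toList, by simp [pvTails], by rw [h]; simp⟩
    · exact ⟨"es.srt".toList, by simp [pvTails], by rw [h]; simp⟩
    · exact ⟨"es.txt".toList, by simp [pvTails], by rw [h]; simp⟩
    · exact ⟨"fr.srt".toList, by simp [pvTails], by rw [h]; simp⟩
    · exact ⟨"fr.txt".toList, by simp [pvTails], by rw [h]; simp⟩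
    · exact ⟨"de.srt".toList, by simp [pvTails], by rw [h]; simp⟩
    · exact ⟨"de.txt".toList, by simp [pvTails], by rw [h]; simp⟩
    · exact ⟨"ru.srt".toList, by simp [pvTails], by rw [h]; simp⟩
    · exact ⟨"ru.txt".toList, by simp [pvTails], by rw [h]; simp⟩
  · rintro ⟨t, ht, hf⟩
    simp [pvTails] at ht
    rcases ht with rfl|rfl|rfl|rfl|rfl|rfl|rfl|rfl|rfl|rfl|rfl|rfl|rfl|rfl|rfl|rfl|rfl|rfl <;>
      simp [hf]

-- ===== VERDICT (by name: the statement is the Claim_ definition above) =====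
theorem is_final_output_file_py_spec : Claim_equal_is_final_output_file_py := by
  intro filename file_prefix _
  unfold Spec_is_final_output_file_py
  have := (A_iff filename file_prefix).trans (B_iff filename file_prefix).symm
  cases hA : is_final_output_file_py filename file_prefix <;>
    cases hB : is_final_output_file_py_alt filename file_prefix <;>
      simp_all
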